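-- pv_equiv track=rewrite | github.com/hyo-nu/Algorithm_Training | 프로그래머스/lv0/120834. 외계행성의 나이/외계행성의 나이.py | solution
-- ===== SOURCE A (Python) =====
-- def solution(age):
--
--     alpa = ['a','b','c','d','e','f','g','h','i','j']
--
--     answer_f = ''
--     answer = ''
--
--     while age != 0:
--         answer_f = answer_f + alpa[age % 10]
--         age = age // 10
--
--     for c in range(len(answer_f),0,-1):
--         answer = answer + answer_f[c-1]
--
--     return answer
-- ===== SOURCE B (Python) =====
-- def solution(age):
--     return ''.join(chr(ord(d) - ord('0') + ord('a')) for d in str(age))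
-- ===== Notes on version B (the rewrite author's own statement) =====
-- stated objective: idiomatic
-- what changed: B makes one direct pass over the decimal string str(age), mapping each digit character to a letter by character arithmetic, instead of A's modulo/floor-division digit-extraction loop followed by a second index-counting reversal loop.
-- intended difference: For age = 0 A's while-loop never runs and it returns the empty string, while B returns 'a', the letter encoding of the digit 0, which is the intended value of the digit-to-letter conversion (the problem's ages are >= 1, so A's '' is an accident of its loop). — e.g. on solution(0): A returns "", B returns "a"
import Mathlib
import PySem

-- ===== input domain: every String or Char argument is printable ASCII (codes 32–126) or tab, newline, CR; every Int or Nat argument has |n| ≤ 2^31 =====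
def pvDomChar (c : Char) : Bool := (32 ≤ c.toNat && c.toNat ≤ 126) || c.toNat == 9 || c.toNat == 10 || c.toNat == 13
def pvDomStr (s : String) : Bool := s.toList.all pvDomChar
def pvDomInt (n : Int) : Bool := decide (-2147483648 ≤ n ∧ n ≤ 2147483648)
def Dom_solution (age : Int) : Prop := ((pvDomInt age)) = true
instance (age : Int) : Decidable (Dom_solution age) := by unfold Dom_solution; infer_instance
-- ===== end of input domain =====

-- B converts the digits of str(age) to letters in one left-to-right pass (idiomatic),
-- replacing A's modulo digit-extraction loop plus separate reversal loop.

-- ===== PORT A =====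
def alpaA : List Char := ['a','b','c','d','e','f','g','h','i','j']

-- `while age != 0: answer_f += alpa[age % 10]; age //= 10`
-- (the `age < 0` branch marks where the Python loop never terminates; outside Pre_)
def solutionLoopA (age : Int) (answer_f : List Char) : List Char :=
  if _h0 : age = 0 then answer_f
  else if _hneg : age < 0 then answer_f
  else solutionLoopA (PySem.Int.floordiv age 10)
        (answer_f ++ [PySem.List.pyGetD alpaA (PySem.Int.mod age 10) 'a'])
termination_by age.toNat
decreasing_by
  have h1 : 0 < age := by omega
  obtain ⟨n, rfl⟩ : ∃ n : Nat, age = (n : Int) := ⟨age.toNat, (Int.toNat_of_nonneg (le_of_lt h1)).symm⟩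
  rw [show ((10 : Int)) = ((10 : Nat) : Int) from rfl, PySem.Int.floordiv_natCast]
  have : n / 10 < n := Nat.div_lt_self (by exact_mod_cast h1) (by omega)
  simpa using this

def solution (age : Int) : String :=
  let answer_f := solutionLoopA age []
  let answer := (PySem.List.pyRange (PySem.List.len answer_f) 0 (-1)).foldl
      (fun acc c => acc ++ [PySem.List.pyGetD answer_f (c - 1) 'a']) []
  String.mk answer

-- ===== PORT B =====
-- ''.join(chr(ord(d) - ord('0') + ord('a')) for d in str(age))
def solution_alt (age : Int) : String :=
  String.mk ((PySem.Int.toChars age).map (fun d => Char.ofNat (d.toNat - '0'.toNat + 'a'.toNat)))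

-- ===== PRECONDITION & SPEC =====
-- Pre_ excludes negative ages, on which A's while-loop never terminates (age // 10 stalls at -1).
def Pre_solution (age : Int) : Prop := 0 ≤ age
instance (age : Int) : Decidable (Pre_solution age) := by unfold Pre_solution; infer_instance
def pvWitness_solution : Int := (7)

-- For age = 0 A's while-loop never runs and it returns the empty string, while B returns "a",
-- the letter encoding of the digit 0, which is the intended digit-to-letter conversion
-- (the problem's ages are ≥ 1, so A's "" is an accident of its loop).
def D_solution (age : Int) : Prop := age = 0
instance (age : Int) : Decidable (D_solution age) := by unfold D_solution; infer_instance
def Spec_solution (age : Int) (out : String) : Prop := ¬ D_solution age → out = solution_alt age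
instance (age : Int) (out : String) : Decidable (Spec_solution age out) := by unfold Spec_solution; infer_instance
def pvDiffWitness_solution : Int := (0)
def pvDiffWitnessOut_solution : String × String := ("", "a")

-- ===== CLAIM (what is proved, stated in full; the proofs are below) =====
def Claim_unchanged_solution : Prop := ∀ (age : Int), Dom_solution age → Pre_solution age → Spec_solution age (solution age)
def Claim_changed_solution : Prop := Dom_solution (pvDiffWitness_solution) ∧ Pre_solution (pvDiffWitness_solution) ∧ D_solution (pvDiffWitness_solution) ∧ solution (pvDiffWitness_solution) = pvDiffWitnessOut_solution.1 ∧ solution_alt (pvDiffWitness_solution) = pvDiffWitnessOut_solution.2 ∧ pvDiffWitnessOut_solution.1 ≠ pvDiffWitnessOut_solution.2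
def Claim_exact_solution : Prop := ∀ (age : Int), Dom_solution age → Pre_solution age → D_solution age → solution age ≠ solution_alt age

-- ===== LEMMAS AND PROOFS =====

-- the letter A reads from alpaA for a digit
def letA (d : Nat) : Char := alpaA.getD d 'a'

-- A's while-loop appends the letters of the decimal digits, least significant first
theorem loopA_eq (n : Nat) : ∀ acc : List Char,
    solutionLoopA (n : Int) acc = acc ++ (Nat.digits 10 n).map letA := by
  induction n using Nat.strong_induction_on with
  | _ n ih =>
    intro acc
    rw [solutionLoopA]
    by_cases h0 : n = 0
    · subst h0; simp
    · have hpos : 0 < n := Nat.pos_of_ne_zero h0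
      rw [dif_neg (by exact_mod_cast h0), dif_neg (by exact Int.not_lt.mpr (Int.natCast_nonneg n))]
      rw [show ((10 : Int)) = ((10 : Nat) : Int) from rfl, PySem.Int.floordiv_natCast,
          PySem.Int.mod_natCast, PySem.List.pyGetD_natCast]
      rw [ih (n / 10) (Nat.div_lt_self hpos (by omega))]
      rw [Nat.digits_def' (by omega) hpos]
      simp [letA, List.getD]

-- A's second loop (range(len, 0, -1)) reverses the accumulated characters
theorem revFold (xs : List Char) : ∀ (k : Nat) (acc : List Char), k ≤ xs.length →
    (PySem.List.pyRange (k : Int) 0 (-1)).foldl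
      (fun acc c => acc ++ [PySem.List.pyGetD xs (c - 1) 'a']) acc
    = acc ++ (xs.take k).reverse := by
  intro k
  induction k with
  | zero => intro acc _; simp [PySem.List.pyRange_neg_one_eq_nil]
  | succ k ih =>
    intro acc hk
    rw [PySem.List.pyRange_neg_one_cons (by exact_mod_cast Nat.succ_pos k)]
    simp only [List.foldl_cons]
    have h1 : ((k + 1 : Nat) : Int) - 1 = (k : Int) := by push_cast; ring
    rw [h1, PySem.List.pyGetD_natCast, ih _ (by omega)]
    have hk' : k < xs.length := by omega
    simp only [List.getD, List.getElem?_eq_getElem hk', Option.getD_some]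
    rw [← List.take_concat_get (l := xs) (i := k)]
    · simp
    · exact hk'

theorem revLoop_eq (xs : List Char) :
    (PySem.List.pyRange (PySem.List.len xs) 0 (-1)).foldl
      (fun acc c => acc ++ [PySem.List.pyGetD xs (c - 1) 'a']) [] = xs.reverse := by
  rw [PySem.List.len_eq, revFold xs xs.length [] le_rfl]
  simp

-- Nat.toDigitsCore (behind str(age)) produces the decimal digit characters, most significant first
theorem toDigitsCore_eq (fuel : Nat) : ∀ (n : Nat) (ds : List Char), 1 ≤ n → n < 10 ^ fuel →
    Nat.toDigitsCore 10 fuel n ds = ((Nat.digits 10 n).map Nat.digitChar).reverse ++ ds := by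
  induction fuel with
  | zero => intro n ds h1 h2; omega
  | succ fuel ih =>
    intro n ds h1 h2
    rw [Nat.toDigitsCore]
    by_cases hq : n / 10 = 0
    · have hn : n < 10 := by omega
      simp only [hq, reduceIte]
      rw [Nat.digits_def' (by omega) (by omega), hq]
      simp [Nat.mod_eq_of_lt hn]
    · simp only [if_neg hq]
      rw [ih (n / 10) _ (by omega) (Nat.div_lt_of_lt_mul (by rw [← pow_succ']; exact h2))]
      rw [Nat.digits_def' (show 1 < 10 by omega) (show 0 < n by omega)]
      simp

theorem toChars_pos (n : Nat) (hn : 0 < n) :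
    PySem.Int.toChars (n : Int) = ((Nat.digits 10 n).map Nat.digitChar).reverse := by
  rw [PySem.Int.toChars]
  rw [if_neg (by exact Int.not_lt.mpr (Int.natCast_nonneg n))]
  rw [Nat.toDigits, Int.toNat_natCast]
  rw [toDigitsCore_eq (n + 1) n [] hn (by
    calc n < 10 ^ n := Nat.lt_pow_self (by omega)
      _ ≤ 10 ^ (n + 1) := Nat.pow_le_pow_right (by omega) (by omega))]
  simp

theorem letA_digitChar (d : Nat) (hd : d < 10) :
    letA d = Char.ofNat ((Nat.digitChar d).toNat - '0'.toNat + 'a'.toNat) := by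
  interval_cases d <;> rfl

theorem solution_eq_alt (age : Int) (hpre : 0 ≤ age) (hne : age ≠ 0) :
    solution age = solution_alt age := by
  obtain ⟨n, rfl⟩ : ∃ n : Nat, age = (n : Int) := ⟨age.toNat, (Int.toNat_of_nonneg hpre).symm⟩
  have hn : 0 < n := by exact_mod_cast lt_of_le_of_ne hpre (Ne.symm hne)
  show String.mk _ = String.mk _
  rw [revLoop_eq, loopA_eq n [], toChars_pos n hn]
  simp only [List.nil_append, List.map_reverse, List.map_map]
  congr 2
  apply List.map_congr_left
  intro d hd
  exact letA_digitChar d (Nat.digits_lt_base (by omega) hd)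

theorem loopA_zero : solutionLoopA 0 [] = [] := by rw [solutionLoopA]; rfl

theorem solution_zero : solution 0 = "" := by
  simp [solution, loopA_zero, PySem.List.len, PySem.List.pyRange]
  rfl

-- ===== VERDICT (by name: the statement is the Claim_ definition above) =====
theorem solution_spec : Claim_unchanged_solution := by
  intro age _hdom hpre hD
  exact solution_eq_alt age hpre (by unfold D_solution at hD; exact hD)

theorem solution_changed : Claim_changed_solution := by
  unfold Claim_changed_solution
  refine ⟨by decide, by decide, by decide, solution_zero, by decide, by decide⟩

theorem solution_tight : Claim_exact_solution := by
  intro age _ _ hD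
  unfold D_solution at hD
  subst hD
  rw [solution_zero]
  decide
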